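-- pv_equiv track=rewrite | github.com/tsouvarev/advent_of_code | 2017/09_stream_processing/part_2.py | _keep_garbage
-- ===== SOURCE A (Python) =====
-- from collections.abc import Iterator
--
-- def _keep_garbage(stream: str) -> Iterator[str]:
--     ignore_next, inside_garbage = False, False
--
--     for c in stream:
--         if ignore_next:
--             ignore_next = False
--             continue
--
--         match c:
--             case "!":
--                 ignore_next = True
--             case "<" if not inside_garbage:
--                 inside_garbage = True
--             case ">":
--                 inside_garbage = False
--             case _:
--                 if inside_garbage:
--                     yield c
-- ===== SOURCE B (Python) =====
-- from collections.abc import Iterator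
--
-- def _keep_garbage(stream: str) -> Iterator[str]:
--     # pass 1: remove escapes ('!' deletes itself and the following char)
--     cleaned = []
--     i, n = 0, len(stream)
--     while i < n:
--         if stream[i] == "!":
--             i += 2
--         else:
--             cleaned.append(stream[i])
--             i += 1
--     # pass 2: simple garbage tracker, no escape logic needed
--     inside = False
--     for c in cleaned:
--         if c == "<" and not inside:
--             inside = True
--         elif c == ">":
--             inside = False
--         elif inside:
--             yield c
-- ===== Notes on version B (the rewrite author's own statement) =====
-- stated objective: simpler
-- what changed: Replaces the fused escape+garbage state machine with two separate passes: first strip every '!'-escape pair by index-jumping, then a trivial inside-garbage scan over the cleaned string with no ignore flag.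
import Mathlib
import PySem

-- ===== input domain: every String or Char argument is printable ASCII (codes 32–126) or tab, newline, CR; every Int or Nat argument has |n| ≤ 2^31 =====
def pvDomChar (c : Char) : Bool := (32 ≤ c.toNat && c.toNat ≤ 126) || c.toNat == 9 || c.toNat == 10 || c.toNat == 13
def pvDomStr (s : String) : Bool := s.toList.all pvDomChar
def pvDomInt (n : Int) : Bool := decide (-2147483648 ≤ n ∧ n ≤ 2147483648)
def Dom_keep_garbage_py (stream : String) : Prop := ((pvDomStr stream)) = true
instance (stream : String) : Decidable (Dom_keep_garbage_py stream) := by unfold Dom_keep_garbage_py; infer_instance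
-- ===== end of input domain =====

-- B replaces A's fused escape+garbage state machine with two separate passes
-- (strip '!'-escapes, then a trivial inside-garbage scan): simpler decomposition, same cost.


-- ===== PORT A =====
-- A's single for-loop with state (ignore_next, inside_garbage); branches in Python's match order.
def pvKeepA : Bool → Bool → List Char → List String
  | _, _, [] => []
  | true, inside, _ :: rest => pvKeepA false inside rest
  | false, inside, c :: rest =>
    if c == '!' then pvKeepA true inside rest
    else if c == '<' && !inside then pvKeepA false true rest
    else if c == '>' then pvKeepA false false rest
    else if inside then String.ofList [c] :: pvKeepA false inside rest
    else pvKeepA false inside rest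

def keep_garbage_py (stream : String) : List String :=
  pvKeepA false false stream.toList

-- ===== PORT B =====
-- pass 1 of Source B: '!' jumps the index by 2 (deleting itself and the next char), else keep the char.
def pvClean : List Char → List Char
  | [] => []
  | '!' :: [] => []
  | '!' :: _ :: rest => pvClean rest
  | c :: rest => c :: pvClean rest

-- pass 2 of Source B: garbage tracker with no escape logic.
def pvScan : Bool → List Char → List String
  | _, [] => []
  | inside, c :: rest =>
    if c == '<' && !inside then pvScan true rest
    else if c == '>' then pvScan false rest
    else if inside then String.ofList [c] :: pvScan inside rest
    else pvScan inside rest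

def keep_garbage_py_alt (stream : String) : List String :=
  pvScan false (pvClean stream.toList)

-- ===== PRECONDITION & SPEC =====
def Spec_keep_garbage_py (stream : String) (out : List String) : Prop := out = keep_garbage_py_alt stream
instance (stream : String) (out : List String) : Decidable (Spec_keep_garbage_py stream out) := by unfold Spec_keep_garbage_py; infer_instance

-- ===== CLAIM (what is proved, stated in full; the proofs are below) =====
def Claim_equal_keep_garbage_py : Prop := ∀ (stream : String), Dom_keep_garbage_py stream → Spec_keep_garbage_py stream (keep_garbage_py stream)

-- ===== LEMMAS AND PROOFS =====
theorem pvKeepA_eq_scan_clean (l : List Char) (g : Bool) :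
    pvKeepA false g l = pvScan g (pvClean l) := by
  induction l using pvClean.induct generalizing g with
  | case1 => rfl
  | case2 => rfl
  | case3 x rest ih =>
      simp only [pvKeepA, pvClean]
      exact ih g
  | case4 c rest h1 h2 ih =>
      have hc : (c == '!') = false := by
        by_cases h : c = '!'
        · subst h
          cases rest with
          | nil => exact (h1 rfl rfl).elim
          | cons x r => exact (h2 x r rfl rfl).elim
        · simp [h]
      simp only [pvKeepA, pvClean, pvScan, hc]
      split_ifs <;> first | contradiction | rw [ih]

-- ===== VERDICT (by name: the statement is the Claim_ definition above) =====
theorem keep_garbage_py_spec : Claim_equal_keep_garbage_py := by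
  intro stream _
  show keep_garbage_py stream = keep_garbage_py_alt stream
  exact pvKeepA_eq_scan_clean stream.toList false
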